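-- pv_equiv track=rewrite | github.com/SegFault2017/Leetcode2020 | 336.palindrome-pairs.py | all_valid_suffixes
-- ===== SOURCE A (Python) =====
-- def all_valid_suffixes(word: str) -> str:
--     n = len(word)
--     for i in range(n):
--         sub_word = word[:i+1]
--         reversed = sub_word[::-1]
--         if sub_word == reversed:
--             yield word[i+1:]
--     pass
-- ===== SOURCE B (Python) =====
-- def all_valid_suffixes(word: str) -> str:
--     n = len(word)
--     for k in range(1, n + 1):
--         # test whether word[:k] is a palindrome by expanding from its center
--         l = (k - 1) // 2
--         r = k // 2
--         while l >= 0 and word[l] == word[r]: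
--             l -= 1
--             r += 1
--         if l < 0:
--             yield word[k:]
-- ===== Notes on version B (the rewrite author's own statement) =====
-- stated objective: alternative
-- what changed: B tests each prefix for palindromicity by expanding outward from its center with two index pointers (no slicing and no per-step reversal), instead of A's building each prefix slice and its full reverse and comparing them; the center scan stops at the first mismatching pair.
import Mathlib
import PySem

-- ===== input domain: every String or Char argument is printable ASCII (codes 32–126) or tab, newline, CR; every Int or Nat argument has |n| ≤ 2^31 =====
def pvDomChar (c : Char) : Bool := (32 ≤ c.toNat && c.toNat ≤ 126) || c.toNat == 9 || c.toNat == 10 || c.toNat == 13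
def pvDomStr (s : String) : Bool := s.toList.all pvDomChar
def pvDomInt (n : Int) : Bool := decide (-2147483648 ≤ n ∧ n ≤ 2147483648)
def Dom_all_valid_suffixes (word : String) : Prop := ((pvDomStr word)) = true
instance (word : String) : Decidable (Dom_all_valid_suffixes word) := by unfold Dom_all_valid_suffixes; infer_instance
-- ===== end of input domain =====

-- B tests each prefix's palindromicity by a two-pointer scan expanding from the prefix's center,
-- instead of A's slice-and-reverse comparison; same results, different traversal (objective: alternative).


-- ===== PORT A =====
-- the generator's yielded values, collected in order
def all_valid_suffixes (word : String) : List String :=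
  let n := PySem.Str.len word
  (PySem.List.pyRange 0 n 1).foldl (fun acc i =>
    let sub := PySem.Str.slice word none (some (i + 1))
    -- sub[::-1]: step -1 is never 0, so slice? is always `some`; the getD default is unreachable
    let rev := (PySem.Str.slice? sub none none (-1)).getD sub
    if sub = rev then acc ++ [PySem.Str.slice word (some (i + 1)) none] else acc) []

-- ===== PORT B =====
-- while l >= 0 and word[l] == word[r]: l -= 1; r += 1   — success iff every pair matched down to l = 0
def pvPairs (cs : List Char) : Nat → Nat → Bool
  | 0, r => cs[0]? == cs[r]?
  | l + 1, r => (cs[l + 1]? == cs[r]?) && pvPairs cs l (r + 1)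

def all_valid_suffixes_alt (word : String) : List String :=
  let cs := word.toList
  (List.range cs.length).foldl (fun acc j =>
    let k := j + 1
    if pvPairs cs ((k - 1) / 2) (k / 2) then acc ++ [String.ofList (cs.drop k)] else acc) []

-- ===== PRECONDITION & SPEC =====
def Spec_all_valid_suffixes (word : String) (out : List String) : Prop := out = all_valid_suffixes_alt word
instance (word : String) (out : List String) : Decidable (Spec_all_valid_suffixes word out) := by unfold Spec_all_valid_suffixes; infer_instance

-- ===== CLAIM (what is proved, stated in full; the proofs are below) =====
def Claim_equal_all_valid_suffixes : Prop := ∀ (word : String), Dom_all_valid_suffixes word → Spec_all_valid_suffixes word (all_valid_suffixes word)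

-- ===== LEMMAS AND PROOFS =====

-- B's center scan succeeds iff every pair (i, r + (l - i)) for i ≤ l matches
theorem pvPairs_iff (cs : List Char) (l r : Nat) :
    pvPairs cs l r = true ↔ ∀ i ≤ l, cs[i]? = cs[r + (l - i)]? := by
  induction l generalizing r with
  | zero =>
    simp [pvPairs]
  | succ l ih =>
    simp only [pvPairs, Bool.and_eq_true, beq_iff_eq, ih]
    constructor
    · rintro ⟨h1, h2⟩ i hi
      rcases Nat.lt_or_ge i (l + 1) with h | h
      · have := h2 i (by omega)
        have e : r + 1 + (l - i) = r + (l + 1 - i) := by omega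
        rwa [e] at this
      · have : i = l + 1 := by omega
        subst this; simpa using h1
    · intro h
      refine ⟨by simpa using h (l + 1) le_rfl, fun i hi => ?_⟩
      have := h i (by omega)
      have e : r + (l + 1 - i) = r + 1 + (l - i) := by omega
      rwa [e] at this

-- a prefix of length k is a palindrome iff all center pairs (i, k-1-i), i ≤ (k-1)/2, match
theorem take_palindrome_iff (cs : List Char) (k : Nat) (hk : k ≤ cs.length) (h0 : 0 < k) :
    ((cs.take k).reverse = cs.take k) ↔ ∀ i ≤ (k - 1) / 2, cs[i]? = cs[k - 1 - i]? := by
  have hlen : (cs.take k).length = k := by simp [Nat.min_eq_left hk]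
  have htake : ∀ i : Nat, i < k → (cs.take k)[i]? = cs[i]? := fun i hi =>
    List.getElem?_take_of_lt hi
  have hrev : ∀ i : Nat, i < k → (cs.take k).reverse[i]? = cs[k - 1 - i]? := by
    intro i hi
    rw [List.getElem?_reverse (by omega), hlen, htake (k - 1 - i) (by omega)]
  constructor
  · intro hp i hi
    have h := congrArg (fun l => l[i]?) hp
    simp only at h
    rw [hrev i (by omega), htake i (by omega)] at h
    exact h.symm
  · intro h
    apply List.ext_getElem?
    intro i
    by_cases hik : i < k
    · rw [hrev i hik, htake i hik]
      by_cases hc : i ≤ (k - 1) / 2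
      · exact (h i hc).symm
      · have h2 := h (k - 1 - i) (by omega)
        rw [show k - 1 - (k - 1 - i) = i by omega] at h2
        exact h2
    · have e1 : (cs.take k).reverse[i]? = none :=
        List.getElem?_eq_none_iff.mpr (by rw [List.length_reverse, hlen]; omega)
      have e2 : (cs.take k)[i]? = none := List.getElem?_eq_none_iff.mpr (by omega)
      rw [e1, e2]

-- B's branch condition holds iff A's palindrome test holds, for each admissible k
theorem cond_iff (cs : List Char) (k : Nat) (hk : k ≤ cs.length) (h0 : 0 < k) :
    ((cs.take k).reverse = cs.take k) ↔ pvPairs cs ((k - 1) / 2) (k / 2) = true := by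
  rw [take_palindrome_iff cs k hk h0, pvPairs_iff]
  constructor
  · intro h i hi
    have e : k / 2 + ((k - 1) / 2 - i) = k - 1 - i := by omega
    rw [e]
    exact h i hi
  · intro h i hi
    have e : k - 1 - i = k / 2 + ((k - 1) / 2 - i) := by omega
    rw [e]
    exact h i hi

-- ===== VERDICT (by name: the statement is the Claim_ definition above) =====
theorem all_valid_suffixes_spec : Claim_equal_all_valid_suffixes := by
  intro word _
  unfold Spec_all_valid_suffixes all_valid_suffixes all_valid_suffixes_alt
  simp only [PySem.Str.len_eq, PySem.Str.slice?_none_none_neg_one, Option.getD_some]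
  rw [PySem.List.pyRange_one]
  simp only [sub_zero, Int.toNat_natCast, zero_add, List.foldl_map]
  apply PySem.List.foldl_congr_mem
  intro acc j hj
  have hj' : j < word.toList.length := List.mem_range.mp hj
  have hsub : PySem.Str.slice word none (some ((j : Int) + 1)) = String.ofList (word.toList.take (j + 1)) := by
    simp only [PySem.Str.slice, PySem.Chars.slice_eq_listSlice]
    rw [show ((j : Int) + 1) = (((j + 1 : Nat)) : Int) by push_cast; ring, PySem.List.slice_to_natCast]
  have hsuf : PySem.Str.slice word (some ((j : Int) + 1)) none = String.ofList (word.toList.drop (j + 1)) := by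
    simp only [PySem.Str.slice, PySem.Chars.slice_eq_listSlice]
    rw [show ((j : Int) + 1) = (((j + 1 : Nat)) : Int) by push_cast; ring, PySem.List.slice_from_natCast]
  simp only [hsub, hsuf, String.toList_ofList]
  have hc : (String.ofList (word.toList.take (j + 1)) = String.ofList (word.toList.take (j + 1)).reverse)
      ↔ pvPairs word.toList ((j + 1 - 1) / 2) ((j + 1) / 2) = true := by
    rw [String.ofList_inj, eq_comm, cond_iff word.toList (j + 1) (by omega) (by omega)]
  exact if_congr hc rfl rfl
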